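-- pv_equiv track=rewrite | github.com/DarshanSuresh/leetcode_problems | 25_April_2024.py | longestIdealString
-- ===== SOURCE A (Python) =====
-- def longestIdealString(s: str, k: int) -> int:
--     n = len(s)
--     if n == 0:
--         return 0
--
--     # Initialize variables
--     max_len = 0
--     dp = [1] * n  # dp[i] stores the length of the longest ideal subsequence ending at index i
--
--     for i in range(1, n):
--         for j in range(i):
--             diff = abs(ord(s[i]) - ord(s[j]))
--             if diff <= k:
--                 dp[i] = max(dp[i], dp[j] + 1)
--
--         max_len = max(max_len, dp[i])
--
--     return max_len
-- ===== SOURCE B (Python) =====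
-- def longestIdealString(s: str, k: int) -> int:
--     # best maps a character code to the best ideal-subsequence length ending in that code
--     best = {}
--     res = 0
--     for ch in s:
--         c = ord(ch)
--         lo = max(0, c - k)
--         hi = min(127, c + k)
--         m = 0
--         for o in range(lo, hi + 1):
--             m = max(m, best.get(o, 0))
--         cur = 1 + m
--         best[c] = max(best.get(c, 0), cur)
--         res = max(res, cur)
--     return res
-- ===== Notes on version B (the rewrite author's own statement) =====
-- stated objective: faster
-- what changed: Replaced the O(n^2) all-pairs DP over indices by a one-pass DP over character codes: a dict keyed by code holds the best length ending in that code, and each step scans only the window of at most 128 codes within distance k, removing the inner scan over all previous indices.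
-- intended difference: On single-character strings A returns 0 (its max_len accumulator is only updated inside the loop that starts at index 1), while B returns 1, the length of the one-character subsequence, which is the intended answer. — e.g. on longestIdealString("a", 0): A returns 0, B returns 1
import Mathlib
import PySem

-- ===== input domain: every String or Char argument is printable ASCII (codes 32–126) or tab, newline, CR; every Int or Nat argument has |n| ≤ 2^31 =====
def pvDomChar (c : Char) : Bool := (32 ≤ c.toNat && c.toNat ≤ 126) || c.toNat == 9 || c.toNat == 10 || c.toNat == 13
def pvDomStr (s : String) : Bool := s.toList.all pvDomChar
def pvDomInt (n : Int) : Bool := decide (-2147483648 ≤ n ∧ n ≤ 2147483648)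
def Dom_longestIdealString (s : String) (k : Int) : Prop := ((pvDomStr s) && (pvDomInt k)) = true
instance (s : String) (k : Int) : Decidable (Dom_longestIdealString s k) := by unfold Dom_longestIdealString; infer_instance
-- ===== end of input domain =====

-- B replaces A's O(n^2) all-pairs index DP by a one-pass DP over character codes (dict of best
-- length per code, scanning only the ≤128-code window within distance k); objective: faster.

-- ===== PORT A =====
def longestIdealString (s : String) (k : Int) : Int :=
  let cs := s.toList
  let n : Int := (cs.length : Int)
  if n = 0 then 0
  else
    let st :=
      (PySem.List.pyRange 1 n 1).foldl
        (fun (st : Int × List Int) i =>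
          let dpi :=
            (PySem.List.pyRange 0 i 1).foldl
              (fun acc j =>
                let diff := |((PySem.List.pyGetD cs i ' ').toNat : Int)
                             - ((PySem.List.pyGetD cs j ' ').toNat : Int)|
                if diff ≤ k then max acc (PySem.List.pyGetD st.2 j 1 + 1) else acc)
              (PySem.List.pyGetD st.2 i 1)
          (max st.1 dpi, PySem.List.pySetD st.2 i dpi))
        (0, List.replicate cs.length (1 : Int))
    st.1

-- ===== PORT B =====
def altStep (k : Int) (st : PySem.Dict Int Int × Int) (ch : Char) : PySem.Dict Int Int × Int :=
  let c : Int := (ch.toNat : Int)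
  let lo := max 0 (c - k)
  let hi := min 127 (c + k)
  let m := (PySem.List.pyRange lo (hi + 1) 1).foldl (fun m o => max m (st.1.getD o 0)) 0
  let cur := 1 + m
  (st.1.insert c (max (st.1.getD c 0) cur), max st.2 cur)

def longestIdealString_alt (s : String) (k : Int) : Int :=
  (s.toList.foldl (altStep k) (PySem.Dict.empty, 0)).2

-- ===== PRECONDITION & SPEC =====
-- On single-character strings A returns 0 (max_len is only updated in the loop starting at
-- index 1), while B returns 1 — the length of the one-character subsequence, the intended answer.
def D_longestIdealString (s : String) (k : Int) : Prop := s.toList.length = 1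
instance (s : String) (k : Int) : Decidable (D_longestIdealString s k) := by
  unfold D_longestIdealString; infer_instance
def Spec_longestIdealString (s : String) (k : Int) (out : Int) : Prop :=
  ¬ D_longestIdealString s k → out = longestIdealString_alt s k
instance (s : String) (k : Int) (out : Int) : Decidable (Spec_longestIdealString s k out) := by
  unfold Spec_longestIdealString; infer_instance
def pvDiffWitness_longestIdealString : String × Int := ("a", 0)
def pvDiffWitnessOut_longestIdealString : Int × Int := (0, 1)

-- ===== CLAIM (what is proved, stated in full; the proofs are below) =====
def Claim_unchanged_longestIdealString : Prop := ∀ (s : String) (k : Int), Dom_longestIdealString s k → Spec_longestIdealString s k (longestIdealString s k)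
def Claim_changed_longestIdealString : Prop := Dom_longestIdealString (pvDiffWitness_longestIdealString.1) (pvDiffWitness_longestIdealString.2) ∧ D_longestIdealString (pvDiffWitness_longestIdealString.1) (pvDiffWitness_longestIdealString.2) ∧ longestIdealString (pvDiffWitness_longestIdealString.1) (pvDiffWitness_longestIdealString.2) = pvDiffWitnessOut_longestIdealString.1 ∧ longestIdealString_alt (pvDiffWitness_longestIdealString.1) (pvDiffWitness_longestIdealString.2) = pvDiffWitnessOut_longestIdealString.2 ∧ pvDiffWitnessOut_longestIdealString.1 ≠ pvDiffWitnessOut_longestIdealString.2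
def Claim_exact_longestIdealString : Prop := ∀ (s : String) (k : Int), Dom_longestIdealString s k → D_longestIdealString s k → longestIdealString s k ≠ longestIdealString_alt s k


-- ===== LEMMAS AND PROOFS =====

-- proof-only helpers: the reference DP history `hist`: for each position, (char code, dp value)
def ordC (c : Char) : Int := (c.toNat : Int)
def wmax (k c : Int) (h : List (Int × Int)) : Int :=
  h.foldl (fun m q => if |c - q.1| ≤ k then max m q.2 else m) 0
def kmax (o : Int) (h : List (Int × Int)) : Int :=
  h.foldl (fun m q => if q.1 = o then max m q.2 else m) 0
def hstep (k : Int) (h : List (Int × Int)) (ch : Char) : List (Int × Int) :=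
  h ++ [(ordC ch, 1 + wmax k (ordC ch) h)]
def hist (k : Int) (cs : List Char) : List (Int × Int) := cs.foldl (hstep k) []
def mx (l : List Int) : Int := l.foldl max 0

-- generic max-fold lemmas
theorem foldl_cond_max_ge (P : Int × Int → Prop) [DecidablePred P]
    (h : List (Int × Int)) (a : Int) :
    a ≤ h.foldl (fun m q => if P q then max m q.2 else m) a := by
  induction h generalizing a with
  | nil => simp
  | cons q t ih =>
    simp only [List.foldl_cons]
    refine le_trans ?_ (ih _)
    split
    · exact le_max_left _ _
    · exact le_refl _

theorem wmax_nonneg (k c : Int) (h : List (Int × Int)) : 0 ≤ wmax k c h :=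
  foldl_cond_max_ge (fun q => |c - q.1| ≤ k) h 0

theorem kmax_nonneg (o : Int) (h : List (Int × Int)) : 0 ≤ kmax o h :=
  foldl_cond_max_ge (fun q => q.1 = o) h 0

theorem kmax_append (o : Int) (h : List (Int × Int)) (q : Int × Int) :
    kmax o (h ++ [q]) = if q.1 = o then max (kmax o h) q.2 else kmax o h := by
  simp [kmax, List.foldl_append]

theorem wmax_append (k c : Int) (h : List (Int × Int)) (q : Int × Int) :
    wmax k c (h ++ [q]) = if |c - q.1| ≤ k then max (wmax k c h) q.2 else wmax k c h := by
  simp [wmax, List.foldl_append]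

theorem mx_append (l : List Int) (x : Int) : mx (l ++ [x]) = max (mx l) x := by
  simp [mx, List.foldl_append]

theorem foldl_maxf_norm (f : Int → Int) (R : List Int) :
    ∀ (a : Int), 0 ≤ a →
      R.foldl (fun m o => max m (f o)) a = max a (R.foldl (fun m o => max m (f o)) 0) := by
  induction R with
  | nil => intro a ha; simp [max_eq_left ha]
  | cons o t ih =>
    intro a ha
    simp only [List.foldl_cons]
    rw [ih (max a (f o)) (le_trans ha (le_max_left _ _)), ih (max 0 (f o)) (le_max_left _ _)]
    omega

theorem foldl_max_hmax (l : List Int) : ∀ (a b : Int),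
    l.foldl max (max a b) = max a (l.foldl max b) := by
  induction l with
  | nil => intro a b; simp
  | cons c t ih =>
    intro a b
    simp only [List.foldl_cons, max_assoc]
    exact ih a (max b c)

theorem mx_cons (x : Int) (l : List Int) : mx (x :: l) = max x (mx l) := by
  show List.foldl max (max 0 x) l = max x (mx l)
  rw [max_comm 0 x, foldl_max_hmax]
  rfl

theorem fold_update (oq vq : Int) (g : Int → Int) (hg : ∀ o, 0 ≤ g o) (R : List Int) :
    ∀ (a : Int), 0 ≤ a →
      R.foldl (fun m o => max m (if o = oq then max (g o) vq else g o)) a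
        = if oq ∈ R then max (R.foldl (fun m o => max m (g o)) a) vq
          else R.foldl (fun m o => max m (g o)) a := by
  induction R with
  | nil => intro a ha; simp
  | cons o t ih =>
    intro a ha
    simp only [List.foldl_cons, List.mem_cons]
    by_cases ho : o = oq
    · subst ho
      rw [if_pos rfl]
      have h1 := ih (max a (max (g o) vq)) (le_trans ha (le_max_left _ _))
      have h2 : max a (max (g o) vq) = max (max a (g o)) vq := by omega
      by_cases hR : o ∈ t
      · rw [h1, if_pos hR, if_pos (Or.inl rfl)]
        rw [foldl_maxf_norm g t _ (le_trans ha (le_max_left _ _)),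
            foldl_maxf_norm g t (max a (g o)) (le_trans ha (le_max_left _ _))]
        omega
      · rw [h1, if_neg hR, if_pos (Or.inl rfl)]
        rw [foldl_maxf_norm g t _ (le_trans ha (le_max_left _ _)),
            foldl_maxf_norm g t (max a (g o)) (le_trans ha (le_max_left _ _))]
        omega
    · rw [if_neg ho]
      have h1 := ih (max a (g o)) (le_trans ha (le_max_left _ _))
      rw [h1]
      by_cases hR : oq ∈ t
      · rw [if_pos hR, if_pos (Or.inr hR)]
      · rw [if_neg hR, if_neg (by rintro (h | h); exact ho h.symm; exact hR h)]

-- the grouping lemma: scanning the ≤128-code window of per-code maxima equals scanning history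
theorem group (k c : Int) (h : List (Int × Int))
    (hkey : ∀ q ∈ h, 0 ≤ q.1 ∧ q.1 ≤ 127) (hc : 0 ≤ c ∧ c ≤ 127) :
    (PySem.List.pyRange (max 0 (c - k)) (min 127 (c + k) + 1) 1).foldl
        (fun m o => max m (kmax o h)) 0 = wmax k c h := by
  induction h using List.reverseRecOn with
  | nil =>
    have h0 : ∀ (R : List Int) (a : Int), 0 ≤ a →
        R.foldl (fun m o => max m (kmax o ([] : List (Int × Int)))) a = a := by
      intro R
      induction R with
      | nil => intro a ha; simp
      | cons o t ih =>
        intro a ha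
        simp only [List.foldl_cons]
        rw [show kmax o ([] : List (Int × Int)) = 0 from rfl, max_eq_left ha]
        exact ih a ha
    rw [h0 _ 0 le_rfl]; rfl
  | append_singleton h q ih =>
    have hkeyh : ∀ p ∈ h, 0 ≤ p.1 ∧ p.1 ≤ 127 := fun p hp => hkey p (by simp [hp])
    have hq := hkey q (by simp)
    have hf : ∀ (m o : Int), max m (kmax o (h ++ [q]))
        = max m (if o = q.1 then max (kmax o h) q.2 else kmax o h) := by
      intro m o
      rw [kmax_append]
      by_cases e : o = q.1
      · rw [if_pos e.symm, if_pos e]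
      · rw [if_neg (fun hh => e hh.symm), if_neg e]
    simp only [hf]
    rw [fold_update q.1 q.2 (fun o => kmax o h) (fun o => kmax_nonneg o h) _ 0 le_rfl]
    rw [ih hkeyh, wmax_append]
    by_cases hw : |c - q.1| ≤ k
    · have hm : q.1 ∈ PySem.List.pyRange (max 0 (c - k)) (min 127 (c + k) + 1) 1 := by
        rw [PySem.List.mem_pyRange_one]
        have := abs_le.mp hw
        omega
      rw [if_pos hm, if_pos hw]
    · have hm : q.1 ∉ PySem.List.pyRange (max 0 (c - k)) (min 127 (c + k) + 1) 1 := by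
        rw [PySem.List.mem_pyRange_one]
        rintro ⟨h1, h2⟩
        exact hw (abs_le.mpr (by omega))
      rw [if_neg hm, if_neg hw]

-- hist structure
theorem hist_fold_ext (k : Int) (cs : List Char) :
    ∀ (h : List (Int × Int)), ∃ t, cs.foldl (hstep k) h = h ++ t := by
  induction cs with
  | nil => intro h; exact ⟨[], by simp⟩
  | cons ch t ih =>
    intro h
    obtain ⟨t', ht⟩ := ih (hstep k h ch)
    refine ⟨(ordC ch, 1 + wmax k (ordC ch) h) :: t', ?_⟩
    simp only [hstep] at ht
    simpa [List.append_assoc] using ht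

theorem length_hist_fold (k : Int) (cs : List Char) :
    ∀ (h : List (Int × Int)), (cs.foldl (hstep k) h).length = h.length + cs.length := by
  induction cs with
  | nil => intro h; simp
  | cons ch t ih =>
    intro h
    rw [List.foldl_cons, ih]
    simp [hstep]
    omega

theorem length_hist (k : Int) (cs : List Char) : (hist k cs).length = cs.length := by
  simpa using length_hist_fold k cs []

theorem hist_append_singleton (k : Int) (p : List Char) (ch : Char) :
    hist k (p ++ [ch]) = hist k p ++ [(ordC ch, 1 + wmax k (ordC ch) (hist k p))] := by
  simp [hist, List.foldl_append, hstep]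

theorem hist_take (k : Int) (cs : List Char) (m : Nat) (hm : m ≤ cs.length) :
    (hist k cs).take m = hist k (cs.take m) := by
  obtain ⟨t, ht⟩ := hist_fold_ext k (cs.drop m) (hist k (cs.take m))
  have hsplit : hist k cs = hist k (cs.take m) ++ t := by
    conv_lhs => rw [← List.take_append_drop m cs]
    rw [hist, List.foldl_append]
    exact ht
  rw [hsplit, List.take_left' (by rw [length_hist]; simp [List.length_take]; omega)]

theorem map_fst_hist_fold (k : Int) (cs : List Char) :
    ∀ (h : List (Int × Int)),
      (cs.foldl (hstep k) h).map Prod.fst = h.map Prod.fst ++ cs.map ordC := by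
  induction cs with
  | nil => intro h; simp
  | cons ch t ih =>
    intro h
    rw [List.foldl_cons, ih]
    simp [hstep]

theorem hist_key_mem (k : Int) (cs : List Char) (q : Int × Int) (hq : q ∈ hist k cs) :
    ∃ ch ∈ cs, q.1 = ordC ch := by
  have h1 : q.1 ∈ (hist k cs).map Prod.fst := List.mem_map.mpr ⟨q, hq, rfl⟩
  have h2 : (hist k cs).map Prod.fst = cs.map ordC := by
    simpa using map_fst_hist_fold k cs []
  rw [h2] at h1
  obtain ⟨ch, hch, he⟩ := List.mem_map.mp h1
  exact ⟨ch, hch, he.symm⟩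

theorem hist_val_ge_one_fold (k : Int) (cs : List Char) :
    ∀ (h : List (Int × Int)), (∀ q ∈ h, 1 ≤ q.2) →
      ∀ q ∈ cs.foldl (hstep k) h, 1 ≤ q.2 := by
  induction cs with
  | nil => intro h hh; simpa using hh
  | cons ch t ih =>
    intro h hh
    apply ih
    intro q hq
    rw [hstep, List.mem_append] at hq
    rcases hq with hq | hq
    · exact hh q hq
    · simp at hq
      rw [hq]
      have := wmax_nonneg k (ordC ch) h
      simp
      omega

theorem hist_val_ge_one (k : Int) (cs : List Char) : ∀ q ∈ hist k cs, 1 ≤ q.2 := by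
  exact hist_val_ge_one_fold k cs [] (by simp)

theorem hist_getElem (k : Int) (cs : List Char) (m : Nat) (hm : m < cs.length) :
    (hist k cs)[m]'(by rw [length_hist]; exact hm)
      = (ordC cs[m], 1 + wmax k (ordC cs[m]) (hist k (cs.take m))) := by
  have h1 : cs.take (m + 1) = cs.take m ++ [cs[m]] := by
    rw [List.take_add_one, List.getElem?_eq_getElem hm]
    rfl
  have h2 : (hist k cs).take (m + 1)
      = hist k (cs.take m) ++ [(ordC cs[m], 1 + wmax k (ordC cs[m]) (hist k (cs.take m)))] := by
    rw [hist_take _ _ _ (by omega), h1, hist_append_singleton]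
  have hlen : (hist k (cs.take m)).length = m := by
    rw [length_hist]
    simp [List.length_take]
    omega
  have hm' : m < (hist k cs).length := by rw [length_hist]; exact hm
  have h4 : (hist k cs)[m]? = some (ordC cs[m], 1 + wmax k (ordC cs[m]) (hist k (cs.take m))) := by
    rw [← List.getElem?_take_of_lt (l := hist k cs) (Nat.lt_succ_self m), h2,
        List.getElem?_append_right (by omega)]
    simp [hlen]
  rw [List.getElem?_eq_getElem hm'] at h4
  exact Option.some_injective _ h4

-- B-side loop invariant
theorem alt_loop (k : Int) (cs : List Char) :
    ∀ (pref : List Char) (best : PySem.Dict Int Int) (res : Int),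
      (∀ c ∈ cs, (c.toNat : Int) ≤ 127) →
      (∀ c ∈ pref, (c.toNat : Int) ≤ 127) →
      (∀ o : Int, best.getD o 0 = kmax o (hist k pref)) →
      res = mx ((hist k pref).map Prod.snd) →
      (cs.foldl (altStep k) (best, res)).2 = mx ((hist k (pref ++ cs)).map Prod.snd) := by
  induction cs with
  | nil =>
    intro pref best res _ _ _ hres
    simpa using hres
  | cons ch t ihcs =>
    intro pref best res hcs hpref hbest hres
    rw [List.foldl_cons]
    have hc127 : ordC ch ≤ 127 := hcs ch List.mem_cons_self
    have hc0 : 0 ≤ ordC ch := Int.natCast_nonneg _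
    have hkeys : ∀ q ∈ hist k pref, 0 ≤ q.1 ∧ q.1 ≤ 127 := by
      intro q hq
      obtain ⟨ch', hch', he⟩ := hist_key_mem k pref q hq
      exact ⟨he ▸ Int.natCast_nonneg _, he ▸ hpref ch' hch'⟩
    have hm : (PySem.List.pyRange (max 0 (ordC ch - k)) (min 127 (ordC ch + k) + 1) 1).foldl
        (fun m o => max m (best.getD o 0)) 0 = wmax k (ordC ch) (hist k pref) := by
      have hfe : (fun (m o : Int) => max m (best.getD o 0))
          = fun m o => max m (kmax o (hist k pref)) := by
        funext m o
        rw [hbest]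
      rw [hfe]
      exact group k (ordC ch) (hist k pref) hkeys ⟨hc0, hc127⟩
    have hstepeq : altStep k (best, res) ch
        = (best.insert (ordC ch) (max (best.getD (ordC ch) 0) (1 + wmax k (ordC ch) (hist k pref))),
           max res (1 + wmax k (ordC ch) (hist k pref))) := by
      simp only [altStep, ordC]
      simp only [ordC] at hm
      rw [hm]
    rw [hstepeq]
    have hgoal := ihcs (pref ++ [ch])
      (best.insert (ordC ch) (max (best.getD (ordC ch) 0) (1 + wmax k (ordC ch) (hist k pref))))
      (max res (1 + wmax k (ordC ch) (hist k pref)))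
      (fun c hc => hcs c (List.mem_cons_of_mem _ hc))
      (by
        intro c hc
        rw [List.mem_append] at hc
        rcases hc with hc | hc
        · exact hpref c hc
        · simp at hc
          rw [hc]
          exact hc127)
      (by
        intro o
        rw [hist_append_singleton, kmax_append, PySem.Dict.getD_insert]
        by_cases e : o = ordC ch
        · rw [if_pos e, if_pos e.symm, hbest, e]
        · rw [if_neg e, if_neg (fun hh => e hh.symm), hbest])
      (by
        rw [hist_append_singleton, List.map_append, List.map_singleton, mx_append, hres])
    simpa using hgoal

theorem alt_eq (s : String) (k : Int) (hb : ∀ c ∈ s.toList, (c.toNat : Int) ≤ 127) :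
    longestIdealString_alt s k = mx ((hist k s.toList).map Prod.snd) := by
  have := alt_loop k s.toList [] PySem.Dict.empty 0 hb (by simp)
    (fun o => by rw [PySem.Dict.getD_empty]; rfl) rfl
  simpa [longestIdealString_alt] using this

theorem fold_plus_one (P : Int × Int → Prop) [DecidablePred P] (h : List (Int × Int)) :
    ∀ (a : Int), h.foldl (fun acc q => if P q then max acc (q.2 + 1) else acc) (a + 1)
      = (h.foldl (fun m q => if P q then max m q.2 else m) a) + 1 := by
  induction h with
  | nil => intro a; rfl
  | cons q t ih =>
    intro a
    simp only [List.foldl_cons]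
    by_cases hp : P q
    · rw [if_pos hp, if_pos hp, show max (a + 1) (q.2 + 1) = (max a q.2) + 1 by omega]
      exact ih _
    · rw [if_neg hp, if_neg hp]
      exact ih a

theorem dv_getElem? (k : Int) (cs : List Char) (m : Nat) (hm : m < cs.length) :
    ((hist k cs).map Prod.snd)[m]? = some (1 + wmax k (ordC cs[m]) (hist k (cs.take m))) := by
  rw [List.getElem?_map, List.getElem?_eq_getElem (by rw [length_hist]; exact hm),
      hist_getElem k cs m hm]
  rfl

-- A-side loop invariant
theorem a_loop (s : String) (k : Int) (hb : ∀ c ∈ s.toList, (c.toNat : Int) ≤ 127) :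
    ∀ (t : Nat), 1 + t ≤ s.toList.length →
      (PySem.List.pyRange 1 ((1 + t : Nat) : Int) 1).foldl
          (fun (st : Int × List Int) i =>
            let dpi :=
              (PySem.List.pyRange 0 i 1).foldl
                (fun acc j =>
                  let diff := |((PySem.List.pyGetD s.toList i ' ').toNat : Int)
                               - ((PySem.List.pyGetD s.toList j ' ').toNat : Int)|
                  if diff ≤ k then max acc (PySem.List.pyGetD st.2 j 1 + 1) else acc)
                (PySem.List.pyGetD st.2 i 1)
            (max st.1 dpi, PySem.List.pySetD st.2 i dpi))
          (0, List.replicate s.toList.length (1 : Int))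
        = (mx ((((hist k s.toList).map Prod.snd).take (1 + t)).drop 1),
           ((hist k s.toList).map Prod.snd).take (1 + t)
             ++ List.replicate (s.toList.length - (1 + t)) 1) := by
  intro t
  induction t with
  | zero =>
    intro ht
    have h1 : ((1 + 0 : Nat) : Int) = 1 := by norm_num
    rw [h1, PySem.List.pyRange_one_eq_nil le_rfl, List.foldl_nil]
    have hdv0 : ((hist k s.toList).map Prod.snd)[0]? = some 1 := by
      rw [dv_getElem? k s.toList 0 (by omega)]
      rfl
    have htake : ((hist k s.toList).map Prod.snd).take (1 + 0) = [1] := by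
      rw [show (1 + 0 : Nat) = 0 + 1 from rfl, List.take_add_one, hdv0]
      rfl
    rw [htake]
    have h2 : List.replicate s.toList.length (1 : Int)
        = [1] ++ List.replicate (s.toList.length - (1 + 0)) 1 := by
      conv_lhs => rw [show s.toList.length = (s.toList.length - (1 + 0)) + 1 by omega]
      rw [List.replicate_succ]
      rfl
    rw [h2]
    rfl
  | succ t iht =>
    intro ht
    have hmn : 1 + t < s.toList.length := by omega
    have hcast : ((1 + (t + 1) : Nat) : Int) = ((1 + t : Nat) : Int) + 1 := by push_cast; ring
    rw [hcast, PySem.List.pyRange_one_succ_right (by push_cast; omega), List.foldl_append,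
        iht (by omega), List.foldl_cons, List.foldl_nil]
    set cs := s.toList with hcs
    set n := cs.length with hn
    set m := 1 + t with hmdef
    set dv := (hist k cs).map Prod.snd with hdv
    set dp := dv.take m ++ List.replicate (n - m) 1 with hdp
    set Hm := hist k (cs.take m) with hHm
    have hdvlen : dv.length = n := by rw [hdv, List.length_map, length_hist]
    have htklen : (dv.take m).length = m := by
      rw [List.length_take]
      omega
    have hdplen : dp.length = n := by
      rw [hdp, List.length_append, htklen, List.length_replicate]
      omega
    have hHmlen : Hm.length = m := by
      rw [hHm, length_hist, List.length_take]
      omega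
    have hHmtake : Hm = (hist k cs).take m := (hist_take k cs m (by omega)).symm
    have hinit : PySem.List.pyGetD dp ((m : Nat) : Int) 1 = 1 := by
      rw [PySem.List.pyGetD_natCast, List.getD_eq_getElem?_getD,
          List.getElem?_append_right (by omega), htklen, Nat.sub_self,
          List.getElem?_replicate, if_pos (by omega)]
      rfl
    have hchar : PySem.List.pyGetD cs ((m : Nat) : Int) ' ' = cs[m]'hmn := by
      rw [PySem.List.pyGetD_natCast, List.getD_eq_getElem?_getD, List.getElem?_eq_getElem hmn]
      rfl
    set vm := 1 + wmax k (ordC (cs[m]'hmn)) Hm with hvm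
    have hdvm : dv[m]? = some vm := dv_getElem? k cs m hmn
    have hF : (PySem.List.pyRange 0 ((m : Nat) : Int)).foldl
        (fun acc j =>
          if |((PySem.List.pyGetD cs ((m : Nat) : Int) ' ').toNat : Int)
              - ((PySem.List.pyGetD cs j ' ').toNat : Int)| ≤ k then
            max acc (PySem.List.pyGetD dp j 1 + 1)
          else acc)
        (PySem.List.pyGetD dp ((m : Nat) : Int) 1) = vm := by
      rw [hinit]
      rw [PySem.List.foldl_congr_mem _ _
        (fun acc j =>
          if |ordC (cs[m]'hmn) - (PySem.List.pyGetD Hm j ((0 : Int), (0 : Int))).1| ≤ k then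
            max acc ((PySem.List.pyGetD Hm j ((0 : Int), (0 : Int))).2 + 1)
          else acc) _ ?_]
      · have hrange : ((m : Nat) : Int) = ((Hm.length : Nat) : Int) := by rw [hHmlen]
        rw [hrange, PySem.List.foldl_pyRange_zero_pyGetD' Hm ((0 : Int), (0 : Int))
          (fun acc q => if |ordC (cs[m]'hmn) - q.1| ≤ k then max acc (q.2 + 1) else acc) 1]
        have hfp := fold_plus_one (fun q => |ordC (cs[m]'hmn) - q.1| ≤ k) Hm 0
        rw [show (0 : Int) + 1 = 1 from rfl] at hfp
        rw [hfp, hvm]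
        unfold wmax
        omega
      · intro acc j hj
        rw [PySem.List.mem_pyRange_one] at hj
        have hj0 : 0 ≤ j := hj.1
        have hjm : j < (m : Int) := hj.2
        have hjn : j.toNat < m := by omega
        have e1 : PySem.List.pyGetD cs j ' ' = cs[j.toNat]'(by omega) :=
          PySem.List.pyGetD_eq_getElem cs ' ' hj0 (by omega)
        have e2 : PySem.List.pyGetD dp j 1 = dp[j.toNat]'(by omega) :=
          PySem.List.pyGetD_eq_getElem dp 1 hj0 (by omega)
        have e3 : PySem.List.pyGetD Hm j ((0 : Int), (0 : Int)) = Hm[j.toNat]'(by omega) :=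
          PySem.List.pyGetD_eq_getElem Hm _ hj0 (by omega)
        have e4 : Hm[j.toNat]'(by omega) = (hist k cs)[j.toNat]'(by rw [length_hist]; omega) := by
          have hopt : Hm[j.toNat]? = (hist k cs)[j.toNat]? := by
            rw [hHmtake]
            exact List.getElem?_take_of_lt (by omega)
          rw [List.getElem?_eq_getElem (by omega : j.toNat < Hm.length),
              List.getElem?_eq_getElem (by rw [length_hist]; omega)] at hopt
          exact Option.some_injective _ hopt
        have e5 : (Hm[j.toNat]'(by omega)).1 = ordC (cs[j.toNat]'(by omega)) := by
          rw [e4]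
          have := hist_getElem k cs j.toNat (by omega)
          rw [this]
        have hdpj : dp[j.toNat]? = some (((hist k cs)[j.toNat]'(by rw [length_hist]; omega)).2) := by
          rw [hdp, List.getElem?_append_left (by omega), List.getElem?_take_of_lt hjn, hdv,
              List.getElem?_map, List.getElem?_eq_getElem (by rw [length_hist]; omega)]
          rfl
        have e6 : (Hm[j.toNat]'(by omega)).2 = dp[j.toNat]'(by omega) := by
          rw [List.getElem?_eq_getElem (by omega : j.toNat < dp.length)] at hdpj
          rw [e4]
          exact (Option.some_injective _ hdpj).symm
        rw [hchar, e1, e2]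
        beta_reduce
        rw [e3, e5, e6]
        rfl
    rw [hF]
    have htake1 : dv.take (m + 1) = dv.take m ++ [vm] := by
      rw [List.take_add_one, hdvm]
      rfl
    have hc1 : max (mx (List.drop 1 (List.take m dv))) vm
        = mx (List.drop 1 (List.take (m + 1) dv)) := by
      rw [htake1, List.drop_append_of_le_length (by omega), mx_append]
    have hc2 : PySem.List.pySetD dp ((m : Nat) : Int) vm
        = List.take (m + 1) dv ++ List.replicate (n - (m + 1)) 1 := by
      rw [PySem.List.pySetD_natCast, hdp, List.set_append_right _ _ (by omega), htklen,
          Nat.sub_self, show n - m = (n - (m + 1)) + 1 by omega, List.replicate_succ,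
          List.set_cons_zero, htake1]
      simp
    exact Prod.ext hc1 hc2

theorem a_eq (s : String) (k : Int) (hne : s.toList ≠ [])
    (hb : ∀ c ∈ s.toList, (c.toNat : Int) ≤ 127) :
    longestIdealString s k = mx (((hist k s.toList).map Prod.snd).drop 1) := by
  have hn : 1 ≤ s.toList.length := List.length_pos_iff.mpr hne
  have hal := a_loop s k hb (s.toList.length - 1) (by omega)
  rw [show 1 + (s.toList.length - 1) = s.toList.length by omega] at hal
  have hnz : ((s.toList.length : Int)) ≠ 0 := by
    have : (0 : Int) < (s.toList.length : Int) := by exact_mod_cast hn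
    omega
  simp only [longestIdealString, if_neg hnz]
  rw [hal]
  have htk : ((hist k s.toList).map Prod.snd).take s.toList.length
      = (hist k s.toList).map Prod.snd :=
    List.take_of_length_le (by rw [List.length_map, length_hist])
  rw [htk]

theorem bridge (k : Int) (cs : List Char) (h2 : 2 ≤ cs.length) :
    mx (((hist k cs).map Prod.snd).drop 1) = mx ((hist k cs).map Prod.snd) := by
  have hlen : (hist k cs).length = cs.length := length_hist k cs
  rcases hh : hist k cs with _ | ⟨q0, Ht⟩
  · rw [hh] at hlen; simp at hlen; omega
  · have h0 : 0 < cs.length := by omega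
    have hq0 : q0 = (ordC cs[0], 1 + wmax k (ordC cs[0]) (hist k (cs.take 0))) := by
      have h5 : (hist k cs)[0]? = some q0 := by rw [hh]; rfl
      rw [List.getElem?_eq_getElem (by rw [length_hist]; omega), hist_getElem k cs 0 h0] at h5
      exact (Option.some_injective _ h5).symm
    have hq02 : q0.2 = 1 := by rw [hq0]; rfl
    have hHt : 0 < Ht.length := by
      rw [hh] at hlen
      simp at hlen
      omega
    have hy : 1 ≤ Ht[0].2 := by
      apply hist_val_ge_one k cs
      rw [hh]
      exact List.mem_cons_of_mem _ (Ht.getElem_mem hHt)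
    have hmem : Ht[0].2 ∈ Ht.map Prod.snd := List.mem_map.mpr ⟨Ht[0], Ht.getElem_mem hHt, rfl⟩
    have hle : Ht[0].2 ≤ mx (Ht.map Prod.snd) :=
      (PySem.List.le_foldl_max (Ht.map Prod.snd) 0).2 _ hmem
    simp only [List.map_cons, List.drop_succ_cons, List.drop_zero]
    rw [mx_cons, hq02, max_eq_right (by omega)]

theorem dom_char_bound (s : String) (k : Int) (hdom : Dom_longestIdealString s k) :
    ∀ c ∈ s.toList, (c.toNat : Int) ≤ 127 := by
  intro c hc
  unfold Dom_longestIdealString pvDomStr at hdom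
  simp only [Bool.and_eq_true, List.all_eq_true] at hdom
  have := hdom.1 c hc
  simp [pvDomChar] at this
  omega

-- ===== VERDICT =====

theorem longestIdealString_spec : Claim_unchanged_longestIdealString := by
  intro s k hdom hD
  by_cases hnil : s.toList = []
  · show longestIdealString s k = longestIdealString_alt s k
    have hA : longestIdealString s k = 0 := by simp [longestIdealString, hnil]
    have hB : longestIdealString_alt s k = 0 := by simp [longestIdealString_alt, hnil]
    rw [hA, hB]
  · have hb := dom_char_bound s k hdom
    have hne1 : s.toList.length ≠ 1 := fun h => hD h
    have hne0 : s.toList.length ≠ 0 := fun h => hnil (List.length_eq_zero_iff.mp h)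
    show longestIdealString s k = longestIdealString_alt s k
    rw [a_eq s k hnil hb, alt_eq s k hb, bridge k s.toList (by omega)]
theorem longestIdealString_changed : Claim_changed_longestIdealString := by
  unfold Claim_changed_longestIdealString; decide
theorem longestIdealString_tight : Claim_exact_longestIdealString := by
  intro s k hdom hD
  have hb := dom_char_bound s k hdom
  have hlen : s.toList.length = 1 := hD
  rw [alt_eq s k hb]
  rcases hl : s.toList with _ | ⟨c, rest⟩
  · rw [hl] at hlen
    simp at hlen
  · rw [hl] at hlen
    simp only [List.length_cons] at hlen
    have hrest : rest = [] := List.length_eq_zero_iff.mp (by omega)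
    subst hrest
    have hAlt : mx (List.map Prod.snd (hist k [c])) = 1 := by
      simp [hist, hstep, wmax, mx]
    have hA : longestIdealString s k = 0 := by
      simp [longestIdealString, hl, PySem.List.pyRange_one_eq_nil]
    rw [hA, hAlt]
    omega
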